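-- pv_equiv track=rewrite | github.com/nofun97/PhasedOutGame | program.py | same_checker
-- ===== SOURCE A (Python) =====
-- def same_checker(group, base):
--     '''
--     same_checker takes a group of cards in the form of a list and also a string
--     called base and it returns a boolean showing if the group has the same
--     attributes
--     '''
--
--     # removing aces in the group
--     group = [card for card in group if 'A' not in card]
--
--     for index in range(len(group) - 1):
--         # to check the values
--         if base == 'Value':
--
--             # if the values are different it returns False
--             if group[index][0] != group[index + 1][0]:
--                 return False
--
--         # to check the suits
--         elif base == 'Suit':
--
--             # if the suits are different it returns False
--             if group[index][-1] != group[index + 1][-1]: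
--                 return False
--
--         # to check the colors
--         elif base == 'Color':
--
--             # if the colors are different it returns False
--             colors = {'C': 'Black', 'S': 'Black', 'D': 'Red', 'H': 'Red'}
--             if colors[group[index][-1]] != colors[group[index + 1][-1]]:
--                 return False
--
--     return True
-- ===== SOURCE B (Python) =====
-- def _all_same(proj, cards):
--     if len(cards) < 2:
--         return True
--     first = proj(cards[0])
--     return all(proj(card) == first for card in cards[1:])
--
--
-- def same_checker(group, base):
--     cards = [card for card in group if 'A' not in card]
--     if base == 'Value':
--         return _all_same(lambda card: card[0], cards)
--     if base == 'Suit':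
--         return _all_same(lambda card: card[-1], cards)
--     if base == 'Color':
--         colors = {'C': 'Black', 'S': 'Black', 'D': 'Red', 'H': 'Red'}
--         return _all_same(lambda card: colors[card[-1]], cards)
--     return True
-- ===== Notes on version B (the rewrite author's own statement) =====
-- stated objective: simpler
-- what changed: Replaces A's index-based adjacent-pair loop with the base test re-evaluated on every iteration by a one-time choice of projection (first char / last char / color map) followed by a short-circuiting compare-to-first scan via all(); B returns and raises exactly where A does.
import Mathlib
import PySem

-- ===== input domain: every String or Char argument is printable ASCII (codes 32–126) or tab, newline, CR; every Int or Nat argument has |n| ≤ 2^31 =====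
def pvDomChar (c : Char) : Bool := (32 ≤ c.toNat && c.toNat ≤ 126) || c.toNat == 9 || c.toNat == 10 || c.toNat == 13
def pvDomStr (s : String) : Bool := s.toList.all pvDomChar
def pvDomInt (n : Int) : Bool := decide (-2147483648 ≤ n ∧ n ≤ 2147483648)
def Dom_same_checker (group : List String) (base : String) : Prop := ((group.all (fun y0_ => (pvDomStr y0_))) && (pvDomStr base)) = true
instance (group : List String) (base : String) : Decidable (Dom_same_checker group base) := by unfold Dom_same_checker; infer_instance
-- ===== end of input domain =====

-- B replaces A's index-based adjacent-pair loop (re-testing `base` on every iteration) by a one-time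
-- choice of projection followed by a short-circuiting compare-to-first scan (objective: simpler);
-- B returns and raises exactly where A does.

-- ===== PORT A =====
-- the dict literal {'C': 'Black', 'S': 'Black', 'D': 'Red', 'H': 'Red'}; Python's 1-char strings
-- (card[0], card[-1] and the keys) are ported as Char
def pvColors : PySem.Dict Char String :=
  PySem.Dict.ofList [('C', "Black"), ('S', "Black"), ('D', "Red"), ('H', "Red")]

-- the for-loop over range(len(group)-1); `none` from an indexing/dict lookup is Python's
-- IndexError/KeyError, excluded by Pre_ (the `false` in those arms is never reached under Pre_)
def pvLoopA (g : List String) (base : String) : List Int → Bool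
  | [] => true
  | i :: rest =>
    if base = "Value" then
      match (PySem.List.pyGet? g i).bind (fun c => PySem.Str.pyGet? c 0),
            (PySem.List.pyGet? g (i + 1)).bind (fun c => PySem.Str.pyGet? c 0) with
      | some a, some b => if a ≠ b then false else pvLoopA g base rest
      | _, _ => false
    else if base = "Suit" then
      match (PySem.List.pyGet? g i).bind (fun c => PySem.Str.pyGet? c (-1)),
            (PySem.List.pyGet? g (i + 1)).bind (fun c => PySem.Str.pyGet? c (-1)) with
      | some a, some b => if a ≠ b then false else pvLoopA g base rest
      | _, _ => false
    else if base = "Color" then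
      match ((PySem.List.pyGet? g i).bind (fun c => PySem.Str.pyGet? c (-1))).bind pvColors.get?,
            ((PySem.List.pyGet? g (i + 1)).bind (fun c => PySem.Str.pyGet? c (-1))).bind pvColors.get? with
      | some a, some b => if a ≠ b then false else pvLoopA g base rest
      | _, _ => false
    else pvLoopA g base rest

def same_checker (group : List String) (base : String) : Bool :=
  let g := group.filter (fun card => !(PySem.Str.isIn "A" card))
  pvLoopA g base (PySem.List.pyRange 0 ((g.length : Int) - 1) 1)

-- ===== PORT B =====
-- all(proj(card) == first for card in cards[1:]) — short-circuits; `none` (a raise) stops the scan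
def pvGoB {α : Type} [DecidableEq α] (proj : String → Option α) (v : α) : List String → Bool
  | [] => true
  | c :: t =>
    match proj c with
    | none => false
    | some w => if w ≠ v then false else pvGoB proj v t

-- _all_same(proj, cards)
def pvAllSameB {α : Type} [DecidableEq α] (proj : String → Option α) (cards : List String) : Bool :=
  if cards.length < 2 then true
  else
    match cards with
    | [] => true
    | c :: t =>
      match proj c with
      | none => false
      | some first => pvGoB proj first t

def same_checker_alt (group : List String) (base : String) : Bool :=
  let cards := group.filter (fun card => !(PySem.Str.isIn "A" card))
  if base = "Value" then pvAllSameB (fun c => PySem.Str.pyGet? c 0) cards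
  else if base = "Suit" then pvAllSameB (fun c => PySem.Str.pyGet? c (-1)) cards
  else if base = "Color" then
    pvAllSameB (fun c => (PySem.Str.pyGet? c (-1)).bind pvColors.get?) cards
  else true

-- ===== PRECONDITION & SPEC =====
-- per-base projection used only to STATE where A raises (never by the ports' computation path)
def pvProjSome (base c : String) : Bool :=
  if base = "Value" then (PySem.Str.pyGet? c 0).isSome
  else if base = "Suit" then (PySem.Str.pyGet? c (-1)).isSome
  else if base = "Color" then ((PySem.Str.pyGet? c (-1)).bind pvColors.get?).isSome
  else true

def pvProjEq (base c d : String) : Bool :=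
  if base = "Value" then PySem.Str.pyGet? c 0 == PySem.Str.pyGet? d 0
  else if base = "Suit" then PySem.Str.pyGet? c (-1) == PySem.Str.pyGet? d (-1)
  else if base = "Color" then
    (PySem.Str.pyGet? c (-1)).bind pvColors.get? == (PySem.Str.pyGet? d (-1)).bind pvColors.get?
  else true

-- Pre_ excludes exactly the inputs on which A raises (IndexError on ''[0]/''[-1], KeyError in the
-- colors dict): those where, among the ≥ 2 non-ace cards, some card has no projection and every
-- earlier card projects to the same value as card 0 (so A's scan reaches the bad card). B raises
-- there too; on every input where A returns, Pre_ holds.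
def Pre_same_checker (group : List String) (base : String) : Prop :=
  let g := group.filter (fun card => !(PySem.Str.isIn "A" card))
  2 ≤ g.length →
    ∀ k, k < g.length → pvProjSome base (g.getD k "") = false →
      ∃ i, i < k ∧ (pvProjSome base (g.getD i "") = false ∨
                    pvProjEq base (g.getD i "") (g.getD 0 "") = false)
instance (group : List String) (base : String) : Decidable (Pre_same_checker group base) := by
  unfold Pre_same_checker; infer_instance

def pvWitness_same_checker : List String × String := (["2H", "3H"], "Value")

def Spec_same_checker (group : List String) (base : String) (out : Bool) : Prop := out = same_checker_alt group base
instance (group : List String) (base : String) (out : Bool) : Decidable (Spec_same_checker group base out) := by unfold Spec_same_checker; infer_instance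

-- ===== CLAIM (what is proved, stated in full; the proofs are below) =====
def Claim_equal_same_checker : Prop := ∀ (group : List String) (base : String), Dom_same_checker group base → Pre_same_checker group base → Spec_same_checker group base (same_checker group base)

-- ===== LEMMAS AND PROOFS =====

-- proof-side skeleton of one fixed branch of A's loop
def pvLoopGen {α : Type} [DecidableEq α] (p : Int → Option α) : List Int → Bool
  | [] => true
  | i :: rest =>
    match p i, p (i + 1) with
    | some a, some b => if a ≠ b then false else pvLoopGen p rest
    | _, _ => false

-- proof-side adjacent-pair scan over the projected values
def pvAdj {α : Type} [DecidableEq α] : List (Option α) → Bool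
  | [] => true
  | [_] => true
  | a :: b :: t =>
    match a, b with
    | some x, some y => if x ≠ y then false else pvAdj (b :: t)
    | _, _ => false

-- proof-side compare-to-first scan over the projected values
def pvGo {α : Type} [DecidableEq α] (v : α) : List (Option α) → Bool
  | [] => true
  | o :: t =>
    match o with
    | none => false
    | some w => if w ≠ v then false else pvGo v t

theorem pvLoopA_value (g : List String) (l : List Int) :
    pvLoopA g "Value" l =
      pvLoopGen (fun i => (PySem.List.pyGet? g i).bind (fun c => PySem.Str.pyGet? c 0)) l := by
  induction l with
  | nil => rfl
  | cons i rest ih =>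
    unfold pvLoopA pvLoopGen
    rw [if_pos rfl]
    rcases (PySem.List.pyGet? g i).bind (fun c => PySem.Str.pyGet? c 0) with _ | a <;>
      rcases (PySem.List.pyGet? g (i + 1)).bind (fun c => PySem.Str.pyGet? c 0) with _ | b <;>
      simp [ih]

theorem pvLoopA_suit (g : List String) (l : List Int) :
    pvLoopA g "Suit" l =
      pvLoopGen (fun i => (PySem.List.pyGet? g i).bind (fun c => PySem.Str.pyGet? c (-1))) l := by
  induction l with
  | nil => rfl
  | cons i rest ih =>
    unfold pvLoopA pvLoopGen
    rw [if_neg (by decide), if_pos rfl]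
    rcases (PySem.List.pyGet? g i).bind (fun c => PySem.Str.pyGet? c (-1)) with _ | a <;>
      rcases (PySem.List.pyGet? g (i + 1)).bind (fun c => PySem.Str.pyGet? c (-1)) with _ | b <;>
      simp [ih]

theorem pvLoopA_color (g : List String) (l : List Int) :
    pvLoopA g "Color" l =
      pvLoopGen (fun i =>
        ((PySem.List.pyGet? g i).bind (fun c => PySem.Str.pyGet? c (-1))).bind pvColors.get?) l := by
  induction l with
  | nil => rfl
  | cons i rest ih =>
    unfold pvLoopA pvLoopGen
    rw [if_neg (by decide), if_neg (by decide), if_pos rfl]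
    rcases ((PySem.List.pyGet? g i).bind (fun c => PySem.Str.pyGet? c (-1))).bind pvColors.get? with _ | a <;>
      rcases ((PySem.List.pyGet? g (i + 1)).bind (fun c => PySem.Str.pyGet? c (-1))).bind pvColors.get? with _ | b <;>
      simp [ih]

theorem pvLoopA_other (g : List String) (base : String) (l : List Int)
    (h1 : base ≠ "Value") (h2 : base ≠ "Suit") (h3 : base ≠ "Color") :
    pvLoopA g base l = true := by
  induction l with
  | nil => rfl
  | cons i rest ih => simp [pvLoopA, h1, h2, h3, ih]

-- shifting the index list by one
theorem pvLoopGen_map_shift {α : Type} [DecidableEq α] (p : Int → Option α) (l : List Int) :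
    pvLoopGen p (l.map (· + 1)) = pvLoopGen (fun i => p (i + 1)) l := by
  induction l with
  | nil => rfl
  | cons i rest ih =>
    show pvLoopGen p ((i + 1) :: rest.map (· + 1)) = _
    unfold pvLoopGen
    rcases p (i + 1) with _ | a <;> rcases p (i + 1 + 1) with _ | b <;> simp [ih]

theorem pvRange_shift (b : Int) :
    PySem.List.pyRange 1 b 1 = (PySem.List.pyRange 0 (b - 1) 1).map (· + 1) := by
  rw [PySem.List.pyRange_one, PySem.List.pyRange_one, List.map_map]
  have h : b - 1 - 0 = b - 1 := by omega
  rw [h]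
  apply List.map_congr_left
  intro k _
  simp
  omega

theorem pvGen_adj {α : Type} [DecidableEq α] (vs : List (Option α)) :
    ∀ (p : Int → Option α), (∀ k, (hk : k < vs.length) → p (k : Int) = vs[k]) →
      pvLoopGen p (PySem.List.pyRange 0 ((vs.length : Int) - 1) 1) = pvAdj vs := by
  induction vs with
  | nil =>
    intro p _
    rw [PySem.List.pyRange_one_eq_nil (by norm_num)]
    rfl
  | cons a tail ih =>
    intro p hp
    rcases tail with _ | ⟨b, t⟩
    · rw [show ((([a] : List (Option α)).length : Int) - 1) = 0 by simp,
        PySem.List.pyRange_one_eq_nil (by norm_num)]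
      rfl
    · have hlen : (((a :: b :: t).length : Int) - 1) = (t.length : Int) + 1 := by
        simp
      rw [hlen, PySem.List.pyRange_one_cons (by omega)]
      have hp0 : p 0 = a := by simpa using hp 0 (by simp)
      have hp1 : p 1 = b := by simpa using hp 1 (by simp)
      have hshift : PySem.List.pyRange 1 ((t.length : Int) + 1) 1 =
          (PySem.List.pyRange 0 (t.length : Int) 1).map (· + 1) := by
        rw [pvRange_shift]
        norm_num
      have hrest : pvLoopGen p (PySem.List.pyRange 1 ((t.length : Int) + 1) 1) =
          pvAdj (b :: t) := by
        rw [hshift, pvLoopGen_map_shift]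
        have hcast : (((b :: t).length : Int) - 1) = (t.length : Int) := by
          rw [List.length_cons]; push_cast; ring
        have := ih (fun i => p (i + 1)) (by
          intro k hk
          show p ((k : Int) + 1) = (b :: t)[k]
          have hke : ((k : Int) + 1) = ((k + 1 : Nat) : Int) := by push_cast; ring
          rw [hke]
          simpa using hp (k + 1) (by simpa using Nat.succ_lt_succ hk))
        rw [hcast] at this
        exact this
      unfold pvLoopGen
      rw [show (0 : Int) + 1 = 1 from rfl, hp0, hp1]
      rcases a with _ | x <;> rcases b with _ | y
      · rfl
      · rfl
      · rfl
      · show (if x ≠ y then false else pvLoopGen p (PySem.List.pyRange 1 ((t.length : Int) + 1) 1)) =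
            pvAdj (some x :: some y :: t)
        have hA : pvAdj (some x :: some y :: t) =
            if x ≠ y then false else pvAdj (some y :: t) := rfl
        rw [hA]
        split_ifs with hxy
        · rfl
        · exact hrest

theorem pvAdj_first {α : Type} [DecidableEq α] (t : List (Option α)) :
    ∀ (v : α), pvAdj (some v :: t) = pvGo v t := by
  induction t with
  | nil => intro v; rfl
  | cons o t' ih =>
    intro v
    rcases o with _ | w
    · rfl
    · show pvAdj (some v :: some w :: t') = pvGo v (some w :: t')
      by_cases hvw : v = w
      · subst hvw
        simp only [pvAdj, pvGo, ne_eq, not_true_eq_false]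
        rw [if_neg (by simp), if_neg (by simp)]
        exact ih v
      · simp [pvAdj, pvGo, hvw, Ne.symm hvw]

theorem pvGo_map {α : Type} [DecidableEq α] (proj : String → Option α) (v : α) (l : List String) :
    pvGo v (l.map proj) = pvGoB proj v l := by
  induction l with
  | nil => rfl
  | cons c t ih =>
    show pvGo v (proj c :: t.map proj) = pvGoB proj v (c :: t)
    unfold pvGo pvGoB
    rcases proj c with _ | w
    · rfl
    · by_cases h : w = v <;> simp [h, ih]

theorem pvAdj_allSame {α : Type} [DecidableEq α] (proj : String → Option α) (g : List String) :
    pvAdj (g.map proj) = pvAllSameB proj g := by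
  rcases g with _ | ⟨c, _ | ⟨d, t⟩⟩
  · rfl
  · rfl
  · show pvAdj (proj c :: proj d :: t.map proj) = pvAllSameB proj (c :: d :: t)
    have hB : pvAllSameB proj (c :: d :: t) =
        match proj c with
        | none => false
        | some first => pvGoB proj first (d :: t) := by
      unfold pvAllSameB
      rw [if_neg (by simp)]
    rw [hB]
    rcases proj c with _ | v
    · rcases proj d with _ | w <;> rfl
    · rw [pvAdj_first]
      exact pvGo_map proj v (d :: t)

-- one fixed branch: A's whole loop equals B's check, with no side condition
theorem pvBranch {α : Type} [DecidableEq α] (g : List String) (proj : String → Option α) :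
    pvLoopGen (fun i => (PySem.List.pyGet? g i).bind proj)
        (PySem.List.pyRange 0 ((g.length : Int) - 1) 1) = pvAllSameB proj g := by
  have hp : ∀ k, (hk : k < (g.map proj).length) →
      (PySem.List.pyGet? g (k : Int)).bind proj = (g.map proj)[k] := by
    intro k hk
    rw [List.length_map] at hk
    rw [PySem.List.pyGet?_natCast, List.getElem?_eq_getElem hk]
    simp
  have := pvGen_adj (g.map proj) (fun i => (PySem.List.pyGet? g i).bind proj) hp
  rw [List.length_map] at this
  rw [this, pvAdj_allSame]

-- ===== VERDICT (by name: the statement is the Claim_ definition above) =====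
theorem same_checker_spec : Claim_equal_same_checker := by
  intro group base _ _
  unfold Spec_same_checker same_checker same_checker_alt
  set g := group.filter (fun card => !(PySem.Str.isIn "A" card)) with hg
  by_cases hv : base = "Value"
  · subst hv; rw [if_pos rfl, pvLoopA_value, pvBranch]
  · rw [if_neg hv]
    by_cases hs : base = "Suit"
    · subst hs; rw [if_pos rfl, pvLoopA_suit, pvBranch]
    · rw [if_neg hs]
      by_cases hc : base = "Color"
      · subst hc
        rw [if_pos rfl, pvLoopA_color]
        simp only [Option.bind_assoc]
        rw [pvBranch]
      · rw [if_neg hc, pvLoopA_other g base _ hv hs hc]
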